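-- pv_equiv track=rewrite | github.com/janmichael88/Leetcode_Monthly_Challenges | Dec_2021.py | maxDistance
-- ===== SOURCE A (Python) =====
-- from typing import List
--
-- def maxDistance(arrays: List[List[int]]) -> int:
--     '''
--     we don't need to compare every i,j array if i != j
--     really what we are asking is for the largest gap between any two arrays in arrrays
--     we can keep track of a min so far and a max so far
--     update the largest abs diff, but also update the min so far and max so far
--     we initalize with the starting array at index 0 and check every array after that
--
--
--     digress:
--         we don't need to another res update after the last 1?
--         because if we did, the curr_min and curr_max would belong to the same array
--     '''
--     res = 0
--     curr_min = arrays[0][0]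
--     curr_max = arrays[0][-1]
--
--     for i in range(1,len(arrays)):
--         #first find the curr diff, abs(min_val - max of curr array)
--         diff1 = abs(arrays[i][-1] - curr_min)
--         #second diff, abs(max_val - min array)
--         diff2 = abs(arrays[i][0] - curr_max)
--         #update answer
--         res = max(res,max(diff1,diff2))
--         #update currmin and currmax
--         curr_min = min(curr_min, arrays[i][0])
--         curr_max = max(curr_max, arrays[i][-1])
--
--     return res
-- ===== SOURCE B (Python) =====
-- from typing import List
--
-- def maxDistance(arrays: List[List[int]]) -> int:
--     # Three-phase: extract endpoint pairs, materialize the running prefix bounds,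
--     # then one max (default 0) over the zipped candidate distances.
--     ends = [(a[0], a[-1]) for a in arrays]
--     lo, hi = ends[0]
--     bounds = []
--     for f, l in ends:
--         lo, hi = min(lo, f), max(hi, l)
--         bounds.append((lo, hi))
--     return max((max(abs(l - lo), abs(f - hi))
--                 for (f, l), (lo, hi) in zip(ends[1:], bounds)), default=0)
-- ===== Notes on version B (the rewrite author's own statement) =====
-- stated objective: alternative
-- what changed: A's single indexed loop that interleaves the answer update with the running min/max is replaced by a three-phase decomposition: extract (first,last) endpoint pairs, materialize the list of running prefix bounds, then take one max (with default 0) over the zipped candidate distances.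
import Mathlib
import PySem

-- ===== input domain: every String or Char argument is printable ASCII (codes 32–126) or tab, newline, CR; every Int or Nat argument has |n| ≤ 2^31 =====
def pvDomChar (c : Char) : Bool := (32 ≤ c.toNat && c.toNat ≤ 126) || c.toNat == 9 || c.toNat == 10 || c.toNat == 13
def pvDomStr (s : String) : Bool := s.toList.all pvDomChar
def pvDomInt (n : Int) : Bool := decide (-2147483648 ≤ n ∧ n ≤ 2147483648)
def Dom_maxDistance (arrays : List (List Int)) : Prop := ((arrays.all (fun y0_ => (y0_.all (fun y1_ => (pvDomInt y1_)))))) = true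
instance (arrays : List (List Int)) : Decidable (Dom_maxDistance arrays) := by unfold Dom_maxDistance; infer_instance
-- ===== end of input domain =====

-- B replaces A's single answer-accumulating loop by a three-phase decomposition
-- (endpoint pairs, materialized prefix bounds, one max over zipped candidates);
-- same cost, alternative structure.


-- ===== PORT A =====
def maxDistance (arrays : List (List Int)) : Int :=
  -- res = 0; curr_min = arrays[0][0]; curr_max = arrays[0][-1]
  let curr_min : Int := PySem.List.pyGetD (PySem.List.pyGetD arrays 0 []) 0 0
  let curr_max : Int := PySem.List.pyGetD (PySem.List.pyGetD arrays 0 []) (-1) 0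
  -- for i in range(1, len(arrays)): …
  let st := (PySem.List.pyRange 1 (arrays.length : Int) 1).foldl
    (fun (st : Int × Int × Int) (i : Int) =>
      let ai := PySem.List.pyGetD arrays i []
      let diff1 := |PySem.List.pyGetD ai (-1) 0 - st.2.1|
      let diff2 := |PySem.List.pyGetD ai 0 0 - st.2.2|
      (max st.1 (max diff1 diff2),
       min st.2.1 (PySem.List.pyGetD ai 0 0),
       max st.2.2 (PySem.List.pyGetD ai (-1) 0)))
    (0, curr_min, curr_max)
  st.1

-- ===== PORT B =====
def maxDistance_alt (arrays : List (List Int)) : Int :=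
  -- ends = [(a[0], a[-1]) for a in arrays]
  let ends := arrays.map (fun a => (PySem.List.pyGetD a 0 0, PySem.List.pyGetD a (-1) 0))
  -- lo, hi = ends[0]
  let e0 := PySem.List.pyGetD ends 0 (0, 0)
  -- bounds = []; for f, l in ends: lo, hi = min(lo, f), max(hi, l); bounds.append((lo, hi))
  let scan := ends.foldl
    (fun (st : List (Int × Int) × Int × Int) (fl : Int × Int) =>
      let lo := min st.2.1 fl.1
      let hi := max st.2.2 fl.2
      (st.1 ++ [(lo, hi)], lo, hi))
    ([], e0.1, e0.2)
  -- max((max(abs(l - lo), abs(f - hi)) for (f, l), (lo, hi) in zip(ends[1:], bounds)), default=0)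
  PySem.List.maxD
    (((ends.drop 1).zip scan.1).map
      (fun p => max |p.1.2 - p.2.1| |p.1.1 - p.2.2|))
    (fun y => y) 0

-- ===== PRECONDITION & SPEC =====
-- Pre_ excludes exactly the inputs on which A raises IndexError: an empty outer
-- list (arrays[0]) or an empty inner list (a[0] / a[-1]).
def Pre_maxDistance (arrays : List (List Int)) : Prop :=
  arrays ≠ [] ∧ ∀ a ∈ arrays, a ≠ []
instance (arrays : List (List Int)) : Decidable (Pre_maxDistance arrays) := by
  unfold Pre_maxDistance; infer_instance

def pvWitness_maxDistance : List (List Int) := [[1, 2], [-5, 4], [7]]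

def Spec_maxDistance (arrays : List (List Int)) (out : Int) : Prop := out = maxDistance_alt arrays
instance (arrays : List (List Int)) (out : Int) : Decidable (Spec_maxDistance arrays out) := by unfold Spec_maxDistance; infer_instance

-- ===== CLAIM (what is proved, stated in full; the proofs are below) =====
def Claim_equal_maxDistance : Prop := ∀ (arrays : List (List Int)), Dom_maxDistance arrays → Pre_maxDistance arrays → Spec_maxDistance arrays (maxDistance arrays)

-- ===== LEMMAS AND PROOFS =====

-- The per-step candidate distance of a (first, last) pair against prefix bounds (lo, hi).
def pvCand (fl lohi : (Int × Int)) : Int := max |fl.2 - lohi.1| |fl.1 - lohi.2|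

-- The candidate distances of a list of endpoint pairs, threading the prefix bounds.
def pvCands : List (Int × Int) → Int → Int → List Int
  | [], _, _ => []
  | fl :: t, lo, hi => pvCand fl (lo, hi) :: pvCands t (min lo fl.1) (max hi fl.2)

-- The running prefix bounds after each endpoint pair.
def pvBounds : List (Int × Int) → Int → Int → List (Int × Int)
  | [], _, _ => []
  | fl :: t, lo, hi => (min lo fl.1, max hi fl.2) :: pvBounds t (min lo fl.1) (max hi fl.2)

lemma pvCands_nonneg (l : List (Int × Int)) (lo hi : Int) :
    ∀ x ∈ pvCands l lo hi, 0 ≤ x := by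
  induction l generalizing lo hi with
  | nil => simp [pvCands]
  | cons fl t ih =>
      intro x hx
      simp only [pvCands, List.mem_cons] at hx
      rcases hx with h | h
      · subst h; exact le_trans (abs_nonneg _) (le_max_left _ _)
      · exact ih _ _ x h

-- A's loop body, over an endpoint pair instead of the raw array.
lemma afold_eq (l : List (Int × Int)) (res lo hi : Int) :
    (l.foldl (fun (st : Int × Int × Int) (fl : Int × Int) =>
        (max st.1 (max |fl.2 - st.2.1| |fl.1 - st.2.2|),
         min st.2.1 fl.1, max st.2.2 fl.2)) (res, lo, hi)).1
      = (pvCands l lo hi).foldl max res := by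
  induction l generalizing res lo hi with
  | nil => simp [pvCands]
  | cons fl t ih => simpa [pvCands, pvCand] using ih _ _ _

-- B's bounds-building loop appends exactly pvBounds.
lemma scan_eq (l : List (Int × Int)) (acc : List (Int × Int)) (lo hi : Int) :
    (l.foldl (fun (st : List (Int × Int) × Int × Int) (fl : Int × Int) =>
        (st.1 ++ [(min st.2.1 fl.1, max st.2.2 fl.2)],
         min st.2.1 fl.1, max st.2.2 fl.2)) (acc, lo, hi)).1
      = acc ++ pvBounds l lo hi := by
  induction l generalizing acc lo hi with
  | nil => simp [pvBounds]
  | cons fl t ih => simp [pvBounds, ih]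

-- Zipping a pair list with its (lo, hi)-headed bounds and mapping the candidate
-- distance yields exactly the threaded candidate list.
lemma zip_cands (l : List (Int × Int)) (lo hi : Int) :
    (l.zip ((lo, hi) :: pvBounds l lo hi)).map
        (fun p => max |p.1.2 - p.2.1| |p.1.1 - p.2.2|)
      = pvCands l lo hi := by
  induction l generalizing lo hi with
  | nil => simp [pvCands]
  | cons fl t ih => simp [pvCands, pvBounds, pvCand, ih]

-- max(cs, default=0) equals a running max from 0 when the candidates are nonnegative.
lemma maxD_eq_foldl (cs : List Int) (h : ∀ x ∈ cs, 0 ≤ x) :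
    PySem.List.maxD cs (fun y => y) 0 = cs.foldl max 0 := by
  cases cs with
  | nil => rfl
  | cons c t =>
      have hc : max 0 c = c := max_eq_right (h c (by simp))
      simp [PySem.List.maxD, PySem.List.max?_id_cons, List.foldl, hc]

-- ===== VERDICT (by name: the statement is the Claim_ definition above) =====
theorem maxDistance_spec : Claim_equal_maxDistance := by
  intro arrays _ hpre
  obtain ⟨hne, -⟩ := hpre
  obtain ⟨a0, rest, rfl⟩ := List.exists_cons_of_ne_nil hne
  unfold Spec_maxDistance maxDistance maxDistance_alt
  simp only [PySem.List.pyGetD_zero_cons]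
  -- name the endpoint extraction
  set endf : List Int → Int × Int :=
    fun a => (PySem.List.pyGetD a 0 0, PySem.List.pyGetD a (-1) 0) with hendf
  -- A side: the indexed loop is the loop over the dropped list, then over mapped pairs
  rw [PySem.List.foldl_pyRange_pyGetD' (a0 :: rest) ([] : List Int)
        (fun (st : Int × Int × Int) (ai : List Int) =>
          (max st.1 (max |PySem.List.pyGetD ai (-1) 0 - st.2.1|
                          |PySem.List.pyGetD ai 0 0 - st.2.2|),
           min st.2.1 (PySem.List.pyGetD ai 0 0),
           max st.2.2 (PySem.List.pyGetD ai (-1) 0)))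
        (0, PySem.List.pyGetD a0 0 0, PySem.List.pyGetD a0 (-1) 0) (by norm_num)]
  have hdrop : ((1 : Int).toNat) = 1 := rfl
  rw [hdrop]
  simp only [List.drop_one, List.tail_cons]
  have hmapfold :
      rest.foldl (fun (st : Int × Int × Int) (ai : List Int) =>
          (max st.1 (max |PySem.List.pyGetD ai (-1) 0 - st.2.1|
                          |PySem.List.pyGetD ai 0 0 - st.2.2|),
           min st.2.1 (PySem.List.pyGetD ai 0 0),
           max st.2.2 (PySem.List.pyGetD ai (-1) 0)))
        (0, PySem.List.pyGetD a0 0 0, PySem.List.pyGetD a0 (-1) 0)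
      = (rest.map endf).foldl (fun (st : Int × Int × Int) (fl : Int × Int) =>
          (max st.1 (max |fl.2 - st.2.1| |fl.1 - st.2.2|),
           min st.2.1 fl.1, max st.2.2 fl.2))
        (0, PySem.List.pyGetD a0 0 0, PySem.List.pyGetD a0 (-1) 0) := by
    rw [List.foldl_map]
  rw [hmapfold, afold_eq]
  -- B side
  simp only [List.map_cons, PySem.List.pyGetD_zero_cons]
  rw [scan_eq]
  simp only [List.nil_append, List.tail_cons]
  have hbounds : pvBounds (endf a0 :: rest.map endf) (endf a0).1 (endf a0).2
      = ((endf a0).1, (endf a0).2) :: pvBounds (rest.map endf) (endf a0).1 (endf a0).2 := by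
    simp [pvBounds]
  rw [hbounds]
  have hzip :
      ((rest.map endf).zip (((endf a0).1, (endf a0).2) :: pvBounds (rest.map endf) (endf a0).1 (endf a0).2)).map
          (fun p => max |p.1.2 - p.2.1| |p.1.1 - p.2.2|)
        = pvCands (rest.map endf) (endf a0).1 (endf a0).2 := by
    exact zip_cands (rest.map endf) (endf a0).1 (endf a0).2
  rw [hzip, maxD_eq_foldl _ (pvCands_nonneg _ _ _)]
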